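-- pv_equiv track=rewrite | github.com/mleece/AdventCode2018 | Michael/day2.py | letterChecksum
-- ===== SOURCE A (Python) =====
-- def letterCounts(word):
--     counts = {}
--     for letter in word:
--         try:
--             counts[letter] += 1
--         except:
--             counts[letter] = 1
--     return counts
--
-- def letterChecksum(idsStr):
--     ids = idsStr.split('\n')
--     pairCount = 0
--     tripleCount = 0
--     for word in ids:
--         counts = letterCounts(word)
--         if 2 in counts.values():
--             pairCount += 1
--         if 3 in counts.values():
--             tripleCount += 1
--     return pairCount * tripleCount
-- ===== SOURCE B (Python) =====
-- def letterChecksum(idsStr):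
--     pairCount = 0
--     tripleCount = 0
--     for word in idsStr.split('\n'):
--         chars = sorted(word)
--         runs = []
--         i = 0
--         n = len(chars)
--         while i < n:
--             j = i + 1
--             while j < n and chars[j] == chars[i]:
--                 j += 1
--             runs.append(j - i)
--             i = j
--         if 2 in runs:
--             pairCount += 1
--         if 3 in runs:
--             tripleCount += 1
--     return pairCount * tripleCount
-- ===== Notes on version B (the rewrite author's own statement) =====
-- stated objective: alternative
-- what changed: Replaces the per-word letter-frequency dictionary with a sort-and-group pass: each word's characters are sorted and consecutive equal-letter runs are scanned, the run lengths playing the role of the letter counts.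
import Mathlib
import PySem

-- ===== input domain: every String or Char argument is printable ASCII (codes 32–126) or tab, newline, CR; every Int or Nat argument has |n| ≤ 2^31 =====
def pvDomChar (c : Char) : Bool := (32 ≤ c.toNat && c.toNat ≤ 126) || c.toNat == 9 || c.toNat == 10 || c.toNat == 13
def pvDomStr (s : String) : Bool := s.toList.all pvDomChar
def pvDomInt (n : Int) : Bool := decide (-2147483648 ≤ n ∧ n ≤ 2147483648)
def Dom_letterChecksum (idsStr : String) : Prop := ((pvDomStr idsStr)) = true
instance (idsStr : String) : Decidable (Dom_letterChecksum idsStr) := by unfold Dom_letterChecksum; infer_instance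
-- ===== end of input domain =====

-- B replaces A's per-word letter-frequency dict with a sort-and-group pass over each
-- word's sorted characters, testing run lengths instead of dict values (alternative; not faster).

-- ===== PORT A =====
def letterCountsPort (word : String) : PySem.Dict Char Int :=
  word.toList.foldl (fun counts letter =>
    match counts.get? letter with
    | some v => counts.insert letter (v + 1)
    | none => counts.insert letter 1) PySem.Dict.empty

def letterChecksum (idsStr : String) : Int :=
  let ids := (PySem.Str.split? idsStr "\n").getD []
  let res := ids.foldl (fun (pc : Int × Int) word =>
    let counts := letterCountsPort word
    let p := if counts.values.contains 2 then pc.1 + 1 else pc.1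
    let t := if counts.values.contains 3 then pc.2 + 1 else pc.2
    (p, t)) (0, 0)
  res.1 * res.2

-- ===== PORT B =====
-- the inner while-loops of Source B: run lengths of consecutive equal characters
def runLens : List Char → List Nat
  | [] => []
  | c :: rest =>
      ((rest.takeWhile (fun x => x == c)).length + 1) ::
        runLens (rest.dropWhile (fun x => x == c))
  termination_by xs => xs.length
  decreasing_by
    simp only [List.length_cons]
    exact Nat.lt_succ_of_le (List.length_dropWhile_le _ _)

def letterChecksum_alt (idsStr : String) : Int :=
  let words := (PySem.Str.split? idsStr "\n").getD []
  let res := words.foldl (fun (pc : Int × Int) word =>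
    let runs := runLens (PySem.List.sorted word.toList (fun c => c) false)
    let p := if runs.contains 2 then pc.1 + 1 else pc.1
    let t := if runs.contains 3 then pc.2 + 1 else pc.2
    (p, t)) (0, 0)
  res.1 * res.2

-- ===== PRECONDITION & SPEC =====
def Spec_letterChecksum (idsStr : String) (out : Int) : Prop := out = letterChecksum_alt idsStr
instance (idsStr : String) (out : Int) : Decidable (Spec_letterChecksum idsStr out) := by unfold Spec_letterChecksum; infer_instance

-- ===== CLAIM (what is proved, stated in full; the proofs are below) =====
def Claim_equal_letterChecksum : Prop := ∀ (idsStr : String), Dom_letterChecksum idsStr → Spec_letterChecksum idsStr (letterChecksum idsStr)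

-- ===== LEMMAS AND PROOFS =====

theorem letterCountsPort_eq_counter (word : String) :
    letterCountsPort word = PySem.Dict.counter word.toList := by
  have h : letterCountsPort word =
      word.toList.foldl (fun (d : PySem.Dict Char Int) x => d.insert x (d.getD x 0 + 1))
        PySem.Dict.empty := by
    unfold letterCountsPort
    congr 1
    funext d c
    simp [PySem.Dict.getD]
    cases d.get? c <;> simp
  rw [h, PySem.Dict.foldl_insert_getD_add_one_eq_counter]

-- A's per-word test: k among the counter's values ↔ some letter occurs exactly k times
theorem values_counter_contains (l : List Char) (k : Nat) :
    (PySem.Dict.counter l).values.contains (k : Int) = true ↔ ∃ c ∈ l, l.count c = k := by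
  have hv : (PySem.Dict.counter l).values =
      (PySem.Set.ofList l).map (fun c => ((l.count c : Int))) := by
    show ((PySem.Dict.counter l).items.map (·.2)) = _
    rw [PySem.Dict.items_counter]
    simp
  rw [hv]
  simp only [List.contains_iff_exists_mem_beq, List.mem_map, beq_iff_eq]
  constructor
  · rintro ⟨v, ⟨c, hc, rfl⟩, hck⟩
    exact ⟨c, (PySem.Set.mem_ofList _ _).1 hc, by exact_mod_cast hck.symm⟩
  · rintro ⟨c, hc, hck⟩
    exact ⟨_, ⟨c, (PySem.Set.mem_ofList _ _).2 hc, rfl⟩, by exact_mod_cast hck.symm⟩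

-- B's per-word test on a sorted list: k among the run lengths ↔ some letter occurs exactly k times
theorem runLens_mem (xs : List Char) (h : xs.Pairwise (· ≤ ·)) (k : Nat) :
    k ∈ runLens xs ↔ ∃ c ∈ xs, xs.count c = k := by
  induction xs using runLens.induct with
  | case1 => simp [runLens]
  | case2 c rest ih =>
    have hsplit := List.takeWhile_append_dropWhile (p := fun x => x == c) (l := rest)
    set t := rest.takeWhile (fun x => x == c) with ht
    set d := rest.dropWhile (fun x => x == c) with hd
    have hrest_le : ∀ x ∈ rest, c ≤ x := (List.pairwise_cons.1 h).1
    have hrest_pw : rest.Pairwise (· ≤ ·) := (List.pairwise_cons.1 h).2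
    have hd_pw : d.Pairwise (· ≤ ·) := hrest_pw.sublist (List.dropWhile_sublist _)
    have ht_eq : ∀ x ∈ t, x = c := fun x hx => by
      have := List.mem_takeWhile_imp hx; simpa using this
    have hd_ne : ∀ x ∈ d, x ≠ c := by
      intro x hx
      rcases hdc : d with _ | ⟨d0, dtl⟩
      · simp [hdc] at hx
      · have hd0 : ¬ (d0 == c) = true := by
          have := List.head?_dropWhile_not (p := fun x => x == c) (l := rest)
          rw [← hd, hdc] at this; simpa using this
        have hd0c : d0 ≠ c := by simpa using hd0
        have hd0mem : d0 ∈ rest := by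
          have : d0 ∈ d := by simp [hdc]
          exact (List.dropWhile_sublist _).mem this
        have hcd0 : c ≤ d0 := hrest_le d0 hd0mem
        have hcd0' : c < d0 := lt_of_le_of_ne hcd0 (Ne.symm hd0c)
        rw [hdc] at hx
        rcases List.mem_cons.1 hx with rfl | hx'
        · exact hd0c
        · have : d0 ≤ x := by
            have := (List.pairwise_cons.1 (hdc ▸ hd_pw)).1
            exact this x hx'
          exact fun hxc => absurd (hxc ▸ this) (not_le.2 hcd0')
    have hcount_c : (c :: rest).count c = t.length + 1 := by
      rw [← hsplit]
      have h1 : t.count c = t.length :=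
        List.count_eq_length.2 (fun b hb => (ht_eq b hb).symm)
      have h2 : d.count c = 0 :=
        List.count_eq_zero.2 (fun hc => (hd_ne c hc) rfl)
      simp [List.count_append, h1, h2, Nat.add_comm]
    have hcount_d : ∀ x ∈ d, (c :: rest).count x = d.count x := by
      intro x hx
      have hxc : x ≠ c := hd_ne x hx
      have hxt : x ∉ t := fun hxt => hxc (ht_eq x hxt)
      rw [← hsplit]
      simp [List.count_append, List.count_eq_zero.2 hxt, Ne.symm hxc]
    rw [runLens]
    simp only [List.mem_cons]
    constructor
    · rintro (rfl | hk)
      · exact ⟨c, Or.inl rfl, by rw [hcount_c]⟩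
      · obtain ⟨x, hxd, hxk⟩ := (ih hd_pw).1 hk
        refine ⟨x, Or.inr ((List.dropWhile_sublist _).mem hxd), ?_⟩
        rw [hcount_d x hxd]; exact hxk
    · rintro ⟨x, hx, hxk⟩
      have : x = c ∨ x ∈ d := by
        rcases hx with rfl | hx'
        · exact Or.inl rfl
        · rw [← hsplit] at hx'
          rcases List.mem_append.1 hx' with h' | h'
          · exact Or.inl (ht_eq x h')
          · exact Or.inr h'
      rcases this with rfl | hxd
      · left; rw [← hxk]; exact hcount_c
      · right
        exact (ih hd_pw).2 ⟨x, hxd, by rw [← hcount_d x hxd]; exact hxk⟩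

-- bridge: B's test on sorted(word) equals A's test on letterCounts(word)
theorem run_test_eq (w : String) (k : Nat) :
    (runLens (PySem.List.sorted w.toList (fun c => c) false)).contains k
      = (letterCountsPort w).values.contains (k : Int) := by
  rw [letterCountsPort_eq_counter]
  have hperm : (PySem.List.sorted w.toList (fun c => c) false).Perm w.toList :=
    PySem.List.sorted_perm _ _ _
  have hpw : (PySem.List.sorted w.toList (fun c => c) false).Pairwise (· ≤ ·) := by
    have := PySem.List.sorted_pairwise (xs := w.toList) (key := fun c => c)
    simpa using this
  rw [Bool.eq_iff_iff]
  constructor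
  · intro hc
    obtain ⟨c, hcm, hck⟩ := (runLens_mem _ hpw k).1 (by simpa using hc)
    exact (values_counter_contains _ k).2
      ⟨c, hperm.mem_iff.1 hcm, by rw [← hperm.count_eq]; exact hck⟩
  · intro hc
    obtain ⟨c, hcm, hck⟩ := (values_counter_contains _ k).1 hc
    have : k ∈ runLens (PySem.List.sorted w.toList (fun c => c) false) :=
      (runLens_mem _ hpw k).2 ⟨c, hperm.mem_iff.2 hcm, by rw [hperm.count_eq]; exact hck⟩
    simpa using this

-- ===== VERDICT (by name: the statement is the Claim_ definition above) =====
theorem letterChecksum_spec : Claim_equal_letterChecksum := by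
  intro idsStr _
  have h2 : ∀ w : String, (runLens (PySem.List.sorted w.toList (fun c => c) false)).contains 2
      = (letterCountsPort w).values.contains (2 : Int) := by
    intro w; have := run_test_eq w 2; simpa using this
  have h3 : ∀ w : String, (runLens (PySem.List.sorted w.toList (fun c => c) false)).contains 3
      = (letterCountsPort w).values.contains (3 : Int) := by
    intro w; have := run_test_eq w 3; simpa using this
  simp only [Spec_letterChecksum, letterChecksum, letterChecksum_alt, h2, h3]
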